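-- pv_equiv track=rewrite | github.com/lejmr/ansible-activemq | filter_plugins/activemq.py | rename_camelcase
-- ===== SOURCE A (Python) =====
-- def rename_camelcase(tpl):
--     read, write, admin, groups = tpl
--     others = [x for x in read if '.' not in x]
--     others += [x for x in write if '.' not in x]
--     others += [x for x in admin if '.' not in x]
--     others += groups
--     tq = [ "{}.Read".format(x) for x in read if '.' in x]
--     tq += [ "{}.Write".format(x) for x in write if '.' in x]
--     tq += [ "{}.Admin".format(x) for x in admin if '.' in x]
--     return set(others + [ ''.join(x.capitalize() or '.' for x in word.split('.')) for word in tq])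
-- ===== SOURCE B (Python) =====
-- def rename_camelcase(tpl):
--     # Tag every permission entry with its suffix up front, classify in one pass,
--     # and camel-case by a single character scan instead of split/capitalize/join.
--     read, write, admin, groups = tpl
--     tagged = [(x, suffix)
--               for xs, suffix in ((read, 'Read'), (write, 'Write'), (admin, 'Admin'))
--               for x in xs]
--     plain, renamed = [], []
--     for x, suffix in tagged:
--         if '.' in x:
--             renamed.append(_camel(x + '.' + suffix))
--         else:
--             plain.append(x)
--     return set(plain + groups + renamed)
--
--
-- def _camel(word):
--     # One left-to-right scan: drops separator dots, uppercases the first letter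
--     # of each dot-separated segment, lowercases the rest, and emits '.' exactly
--     # where a segment is empty (leading / trailing / consecutive dots).
--     out = []
--     empty = True          # current segment empty so far
--     for c in word:
--         if c == '.':
--             if empty:
--                 out.append('.')
--             empty = True
--         else:
--             out.append(c.upper() if empty else c.lower())
--             empty = False
--     if empty:
--         out.append('.')
--     return ''.join(out)
-- ===== Notes on version B (the rewrite author's own statement) =====
-- stated objective: alternative
-- what changed: Replaces the split('.')/capitalize/join transform by a single left-to-right character scan (uppercase at segment start, lowercase inside, '.' emitted only for empty segments), and replaces A's six staged comprehensions by one classify pass over a suffix-tagged stream of all entries.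
import Mathlib
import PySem

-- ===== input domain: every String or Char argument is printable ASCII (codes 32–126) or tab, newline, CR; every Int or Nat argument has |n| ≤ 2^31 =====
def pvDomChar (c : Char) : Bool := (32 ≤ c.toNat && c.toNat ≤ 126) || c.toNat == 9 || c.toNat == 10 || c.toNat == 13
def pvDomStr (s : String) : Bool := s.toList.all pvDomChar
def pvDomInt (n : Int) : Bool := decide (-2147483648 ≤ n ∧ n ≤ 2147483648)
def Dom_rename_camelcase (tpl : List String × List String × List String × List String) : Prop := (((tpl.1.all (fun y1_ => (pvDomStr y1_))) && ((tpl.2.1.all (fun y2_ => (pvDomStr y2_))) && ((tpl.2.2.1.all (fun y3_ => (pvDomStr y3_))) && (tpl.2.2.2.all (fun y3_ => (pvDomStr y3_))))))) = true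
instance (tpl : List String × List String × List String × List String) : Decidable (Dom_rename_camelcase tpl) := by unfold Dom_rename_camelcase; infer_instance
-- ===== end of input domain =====

-- B tags every entry with its suffix up front, classifies in one pass, and
-- camel-cases by a single character scan instead of split/capitalize/join;
-- objective: simpler (alternative algorithm for the transform, same cost).

-- ===== PORT A =====
-- x.capitalize()  (exact on the ASCII domain: first char uppercased, rest lowercased)
def pvCapitalize (s : String) : String :=
  match s.toList with
  | [] => ""
  | c :: t => String.ofList (PySem.Chars.upperChar c :: PySem.Chars.lower t)

-- ''.join(x.capitalize() or '.' for x in word.split('.'))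
-- (sep "." is nonempty, so split? is always `some`; getD [] is never taken)
def pvTransform (word : String) : String :=
  PySem.Str.join "" (((PySem.Str.split? word ".").getD []).map
    (fun x => let c := pvCapitalize x; if c = "" then "." else c))

def rename_camelcase (tpl : List String × List String × List String × List String) : List String :=
  let read := tpl.1
  let write := tpl.2.1
  let admin := tpl.2.2.1
  let groups := tpl.2.2.2
  let others := read.filter (fun x => !(PySem.Str.isIn "." x))
  let others := others ++ write.filter (fun x => !(PySem.Str.isIn "." x))
  let others := others ++ admin.filter (fun x => !(PySem.Str.isIn "." x))
  let others := others ++ groups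
  let tq := (read.filter (fun x => PySem.Str.isIn "." x)).map (fun x => x ++ ".Read")
  let tq := tq ++ (write.filter (fun x => PySem.Str.isIn "." x)).map (fun x => x ++ ".Write")
  let tq := tq ++ (admin.filter (fun x => PySem.Str.isIn "." x)).map (fun x => x ++ ".Admin")
  PySem.Set.ofList (others ++ tq.map pvTransform)

-- ===== PORT B =====
-- _camel: one left-to-right scan over the characters with a buffer and a
-- "current segment empty" flag (transliteration of Source B's loop + final fixup).
def pvCamel (word : String) : String :=
  let st := word.toList.foldl
    (fun (st : List Char × Bool) c =>
      if c = '.' then ((if st.2 then st.1 ++ ['.'] else st.1), true)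
      else (st.1 ++ [if st.2 then PySem.Chars.upperChar c else PySem.Chars.lowerChar c], false))
    ([], true)
  String.ofList (if st.2 then st.1 ++ ['.'] else st.1)

def rename_camelcase_alt (tpl : List String × List String × List String × List String) : List String :=
  let read := tpl.1
  let write := tpl.2.1
  let admin := tpl.2.2.1
  let groups := tpl.2.2.2
  let tagged := [(read, "Read"), (write, "Write"), (admin, "Admin")].flatMap
    (fun p => p.1.map (fun x => (x, p.2)))
  let st := tagged.foldl
    (fun (acc : List String × List String) xp =>
      if PySem.Str.isIn "." xp.1 then (acc.1, acc.2 ++ [pvCamel (xp.1 ++ "." ++ xp.2)])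
      else (acc.1 ++ [xp.1], acc.2))
    ([], [])
  PySem.Set.ofList ((st.1 ++ groups) ++ st.2)

-- ===== PRECONDITION & SPEC =====
def Spec_rename_camelcase (tpl : List String × List String × List String × List String) (out : List String) : Prop := out = rename_camelcase_alt tpl
instance (tpl : List String × List String × List String × List String) (out : List String) : Decidable (Spec_rename_camelcase tpl out) := by unfold Spec_rename_camelcase; infer_instance

-- ===== CLAIM (what is proved, stated in full; the proofs are below) =====
def Claim_equal_rename_camelcase : Prop := ∀ (tpl : List String × List String × List String × List String), Dom_rename_camelcase tpl → Spec_rename_camelcase tpl (rename_camelcase tpl)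

-- ===== LEMMAS AND PROOFS =====

-- reference single-char split (structural recursion), and the two bridges to it
def pvSplit (pre : List Char) : List Char → List (List Char)
  | [] => [pre]
  | c :: t => if c = '.' then pre :: pvSplit [] t else pvSplit (pre ++ [c]) t

-- per-segment value: capitalize, or '.' for the empty segment
def pvCapOrDot (seg : List Char) : List Char :=
  match seg with
  | [] => ['.']
  | c :: t => PySem.Chars.upperChar c :: PySem.Chars.lower t

-- reference scan (structural recursion on the characters, flag = segment empty)
def pvScanRef (e : Bool) : List Char → List Char
  | [] => if e then ['.'] else []
  | c :: t =>
      if c = '.' then (if e then ['.'] else []) ++ pvScanRef true t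
      else (if e then PySem.Chars.upperChar c else PySem.Chars.lowerChar c) :: pvScanRef false t

theorem pvSplitOn_go_eq (fuel : Nat) (l cur : List Char) (acc : List (List Char))
    (h : l.length < fuel) :
    PySem.Chars.splitOn.go ['.'] fuel l cur acc = acc.reverse ++ pvSplit cur.reverse l := by
  induction fuel generalizing l cur acc with
  | zero => omega
  | succ n ih =>
    cases l with
    | nil => simp [PySem.Chars.splitOn.go, pvSplit]
    | cons c rest =>
      rw [PySem.Chars.splitOn.go]
      by_cases hc : c = '.'
      · subst hc
        rw [if_pos (by simp [List.isPrefixOf])]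
        simp only [List.length_cons] at h
        rw [ih _ _ _ (by simpa using Nat.lt_of_succ_lt_succ h)]
        simp [pvSplit]
      · rw [if_neg (by simp [List.isPrefixOf]; exact fun h => hc h.symm)]
        simp only [List.length_cons] at h
        rw [ih _ _ _ (Nat.lt_of_succ_lt_succ h)]
        simp [pvSplit, hc]

theorem pvSplitOn_eq (l : List Char) :
    PySem.Chars.splitOn l ['.'] = pvSplit [] l := by
  unfold PySem.Chars.splitOn
  rw [pvSplitOn_go_eq _ _ _ _ (by omega)]
  simp

theorem pvCapOrDot_append (pre u : List Char) (h : pre ≠ []) :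
    pvCapOrDot (pre ++ u) = pvCapOrDot pre ++ PySem.Chars.lower u := by
  cases pre with
  | nil => exact absurd rfl h
  | cons c t => simp [pvCapOrDot, PySem.Chars.lower]

-- the heart: flatten of capitalized segments = the character scan
theorem pvFlatten_split_eq_scan (l pre : List Char) :
    ((pvSplit pre l).map pvCapOrDot).flatten =
      if pre = [] then pvScanRef true l else pvCapOrDot pre ++ pvScanRef false l := by
  induction l generalizing pre with
  | nil =>
    by_cases hp : pre = [] <;> simp [pvSplit, pvScanRef, hp, pvCapOrDot]
  | cons c t ih =>
    by_cases hc : c = '.'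
    · subst hc
      have h0 := ih []
      rw [if_pos rfl] at h0
      simp only [pvSplit]
      by_cases hp : pre = [] <;> simp [hp, pvScanRef, pvCapOrDot] <;> exact h0
    · simp only [pvSplit, if_neg hc, ih]
      rw [if_neg (by simp)]
      by_cases hp : pre = []
      · subst hp
        simp [pvScanRef, hc, pvCapOrDot, PySem.Chars.lower]
      · rw [pvCapOrDot_append _ _ hp, if_neg hp]
        simp [pvScanRef, hc, PySem.Chars.lower]

-- B's foldl scan = the reference scan
theorem pvFoldScan (l buf : List Char) (e : Bool) :
    (let st := l.foldl
        (fun (st : List Char × Bool) c =>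
          if c = '.' then ((if st.2 then st.1 ++ ['.'] else st.1), true)
          else (st.1 ++ [if st.2 then PySem.Chars.upperChar c else PySem.Chars.lowerChar c], false))
        (buf, e)
      if st.2 then st.1 ++ ['.'] else st.1) = buf ++ pvScanRef e l := by
  induction l generalizing buf e with
  | nil => cases e <;> simp [pvScanRef]
  | cons c t ih =>
    by_cases hc : c = '.'
    · subst hc
      cases e <;> simp only [List.foldl_cons, ih, pvScanRef] <;> simp
    · cases e <;>
        simp only [List.foldl_cons, if_neg hc, ih, pvScanRef] <;>
        simp

theorem pvFlatten_intersperse (l : List (List Char)) :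
    (List.intersperse ([] : List Char) l).flatten = l.flatten := by
  induction l with
  | nil => rfl
  | cons a t ih =>
    cases t with
    | nil => rfl
    | cons b u =>
      show (a :: ([] : List Char) :: List.intersperse [] (b :: u)).flatten = (a :: b :: u).flatten
      simp only [List.flatten_cons, List.nil_append, ih]

-- A's split/capitalize/join transform = B's character scan, on every string
theorem pvTransform_eq_camel (word : String) : pvTransform word = pvCamel word := by
  unfold pvTransform pvCamel
  have hsplit : PySem.Str.split? word "." =
      some ((pvSplit [] word.toList).map String.ofList) := by
    unfold PySem.Str.split? PySem.Chars.split?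
    rw [show ".".toList = ['.'] from rfl]
    simp [pvSplitOn_eq]
  rw [hsplit]
  simp only [Option.getD_some, List.map_map]
  have hmap : ∀ seg : List Char,
      (String.toList ∘ (fun x => let c := pvCapitalize x; if c = "" then "." else c) ∘
        String.ofList) seg = pvCapOrDot seg := by
    intro seg
    cases seg with
    | nil => simp [pvCapitalize, pvCapOrDot]
    | cons c t =>
      simp only [Function.comp_apply, pvCapitalize, String.toList_ofList, pvCapOrDot]
      have hne : String.ofList (PySem.Chars.upperChar c :: PySem.Chars.lower t) ≠ "" := by
        intro h
        have := congrArg String.toList h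
        simp at this
      simp [hne]
  unfold PySem.Str.join
  have : (pvSplit [] word.toList).map
      (String.toList ∘ ((fun x => let c := pvCapitalize x; if c = "" then "." else c) ∘ String.ofList)) =
      (pvSplit [] word.toList).map pvCapOrDot := by
    exact List.map_congr_left (fun seg _ => hmap seg)
  rw [List.map_map, this]
  have hjoin : PySem.Chars.join "".toList ((pvSplit [] word.toList).map pvCapOrDot) =
      ((pvSplit [] word.toList).map pvCapOrDot).flatten := by
    simp [PySem.Chars.join, List.intercalate, pvFlatten_intersperse]
  rw [hjoin, pvFlatten_split_eq_scan, if_pos rfl]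
  have := pvFoldScan word.toList [] true
  simp only [List.nil_append] at this
  rw [← this]

-- B's classify loop, characterised: it appends the non-dotted entries to the
-- first accumulator and the scanned dotted entries to the second
theorem pvClassify (l : List String) (lab : String) (o r : List String) :
    (l.map (fun x => (x, lab))).foldl
      (fun (acc : List String × List String) xp =>
        if PySem.Str.isIn "." xp.1 then (acc.1, acc.2 ++ [pvCamel (xp.1 ++ "." ++ xp.2)])
        else (acc.1 ++ [xp.1], acc.2))
      (o, r)
    = (o ++ l.filter (fun x => !(PySem.Str.isIn "." x)),
       r ++ (l.filter (fun x => PySem.Str.isIn "." x)).map (fun x => pvCamel (x ++ "." ++ lab))) := by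
  induction l generalizing o r with
  | nil => simp
  | cons h t ih =>
    rw [List.map_cons, List.foldl_cons]
    by_cases hx : PySem.Chars.isIn ['.'] h.toList = true
    · rw [if_pos (by simp [hx]), ih]
      simp [hx]
    · rw [if_neg (by simp [hx]), ih]
      simp [hx]

-- ===== VERDICT (by name: the statement is the Claim_ definition above) =====
theorem rename_camelcase_spec : Claim_equal_rename_camelcase := by
  intro tpl _
  unfold Spec_rename_camelcase rename_camelcase rename_camelcase_alt
  obtain ⟨read, write, admin, groups⟩ := tpl
  simp only [List.flatMap_cons, List.flatMap_nil, List.append_nil, List.foldl_append, pvClassify,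
    List.nil_append]
  have hR : ∀ x : String, x ++ ".Read" = x ++ "." ++ "Read" := fun x => by
    rw [String.append_assoc]; rfl
  have hW : ∀ x : String, x ++ ".Write" = x ++ "." ++ "Write" := fun x => by
    rw [String.append_assoc]; rfl
  have hA : ∀ x : String, x ++ ".Admin" = x ++ "." ++ "Admin" := fun x => by
    rw [String.append_assoc]; rfl
  simp only [List.map_append, List.map_map, Function.comp_def, hR, hW, hA,
    pvTransform_eq_camel, List.append_assoc]
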